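-- pv_equiv track=rewrite | github.com/jackvessa/Smart_Groups | Smart_Group_Functions.py | calc_group_sizes
-- ===== SOURCE A (Python) =====
-- def calc_group_sizes(num_students, num_groups):
--     '''
--     Parameters
--     -----------
--     num_students : int
--         Number of students in the class
--     num_groups : int
--         Number of groups to break students into
--
--     Returns
--     ---------
--     group_size : List of ideal group sizes
--     '''
--     group_sizes = []
--
--     class_size = int(num_students)
--     group_num_count = int(num_groups)
--     group_num = int(num_groups)
--
--     for i in range(group_num_count):
--         temp = class_size // group_num
--         class_size -= temp
--         group_num -= 1
--         group_sizes.append(temp)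
--
--     return group_sizes
-- ===== SOURCE B (Python) =====
-- def calc_group_sizes(num_students, num_groups):
--     class_size = int(num_students)
--     n = int(num_groups)
--     if n <= 0:
--         return []
--     q, r = divmod(class_size, n)
--     return [q + (1 if i >= n - r else 0) for i in range(n)]
-- ===== Notes on version B (the rewrite author's own statement) =====
-- stated objective: simpler
-- what changed: Replaces A's iterative 'floor-divide remaining students by remaining groups and subtract' loop with a single divmod and a direct comprehension: the first n-r groups get q and the last r groups get q+1.
import Mathlib
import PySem

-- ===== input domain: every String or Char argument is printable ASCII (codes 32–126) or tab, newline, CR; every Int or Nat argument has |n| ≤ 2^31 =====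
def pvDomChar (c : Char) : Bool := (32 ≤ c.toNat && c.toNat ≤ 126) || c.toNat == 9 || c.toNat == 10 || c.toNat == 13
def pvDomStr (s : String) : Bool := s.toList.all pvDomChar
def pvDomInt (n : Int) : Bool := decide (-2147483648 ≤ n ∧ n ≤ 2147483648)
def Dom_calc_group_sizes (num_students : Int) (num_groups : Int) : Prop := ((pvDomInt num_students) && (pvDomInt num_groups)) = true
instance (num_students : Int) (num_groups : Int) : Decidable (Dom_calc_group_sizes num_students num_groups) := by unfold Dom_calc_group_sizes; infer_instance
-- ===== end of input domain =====

-- B replaces A's iterative 'floor-divide the remaining students by the remaining groups and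
-- subtract' loop with one divmod and a direct comprehension (objective: simpler).

-- ===== PORT A =====
def calc_group_sizes (num_students : Int) (num_groups : Int) : List Int :=
  -- state: (class_size, group_num, group_sizes); loop 'for i in range(group_num_count)'
  let st := (PySem.List.pyRange 0 num_groups 1).foldl
    (fun (st : Int × Int × List Int) _ =>
      let temp := PySem.Int.floordiv st.1 st.2.1
      (st.1 - temp, st.2.1 - 1, st.2.2 ++ [temp]))
    (num_students, num_groups, ([] : List Int))
  st.2.2

-- ===== PORT B =====
def calc_group_sizes_alt (num_students : Int) (num_groups : Int) : List Int :=
  if num_groups ≤ 0 then []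
  else
    let q := PySem.Int.floordiv num_students num_groups
    let r := PySem.Int.mod num_students num_groups
    (PySem.List.pyRange 0 num_groups 1).map
      (fun i => q + if num_groups - r ≤ i then 1 else 0)

-- ===== PRECONDITION & SPEC =====
def Spec_calc_group_sizes (num_students : Int) (num_groups : Int) (out : List Int) : Prop := out = calc_group_sizes_alt num_students num_groups
instance (num_students : Int) (num_groups : Int) (out : List Int) : Decidable (Spec_calc_group_sizes num_students num_groups out) := by unfold Spec_calc_group_sizes; infer_instance

-- ===== CLAIM (what is proved, stated in full; the proofs are below) =====
def Claim_equal_calc_group_sizes : Prop := ∀ (num_students : Int) (num_groups : Int), Dom_calc_group_sizes num_students num_groups → Spec_calc_group_sizes num_students num_groups (calc_group_sizes num_students num_groups)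

-- ===== LEMMAS AND PROOFS =====

-- A's loop, recast as structural recursion on the iteration count.
def runA : Nat → Int → Int → List Int → List Int
  | 0, _, _, acc => acc
  | k+1, s, g, acc =>
    let t := PySem.Int.floordiv s g
    runA k (s - t) (g - 1) (acc ++ [t])

lemma foldl_eq_runA (l : List Int) : ∀ (s g : Int) (acc : List Int),
    ((l.foldl
      (fun (st : Int × Int × List Int) _ =>
        let temp := PySem.Int.floordiv st.1 st.2.1
        (st.1 - temp, st.2.1 - 1, st.2.2 ++ [temp]))
      (s, g, acc)).2.2) = runA l.length s g acc := by
  induction l with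
  | nil => intro s g acc; simp [runA]
  | cons x xs ih => intro s g acc; simp [List.foldl, runA, ih]

-- the closed-form pattern: k values, base q, the entries with index ≥ thr get q+1
def pat (q thr : Int) (k : Nat) : List Int :=
  (List.range k).map (fun (j : Nat) => q + if thr ≤ (j:Int) then 1 else 0)

lemma pat_cons (q thr : Int) (k : Nat) :
    pat q thr (k+1) = (q + if thr ≤ 0 then 1 else 0) :: pat q (thr - 1) k := by
  unfold pat
  rw [List.range_succ_eq_map, List.map_cons, List.map_map]
  congr 1
  apply List.map_congr_left
  intro j _
  simp only [Function.comp]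
  push_cast
  by_cases hc : thr - 1 ≤ (j:Int)
  · rw [if_pos hc, if_pos (by omega)]
  · rw [if_neg hc, if_neg (by omega)]

lemma pat_congr (q q' thr thr' : Int) (k : Nat)
    (h : ∀ j : Nat, j < k → (q + if thr ≤ (j:Int) then 1 else 0) = (q' + if thr' ≤ (j:Int) then 1 else 0)) :
    pat q thr k = pat q' thr' k := by
  unfold pat
  apply List.map_congr_left
  intro j hj
  exact h j (List.mem_range.mp hj)

-- closed form for the loop when it starts with g = number of remaining iterations
lemma runA_closed : ∀ (k : Nat) (s : Int) (acc : List Int),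
    runA (k+1) s ((k:Int)+1) acc =
      acc ++ pat (PySem.Int.floordiv s ((k:Int)+1))
               (((k:Int)+1) - PySem.Int.mod s ((k:Int)+1)) (k+1) := by
  intro k
  induction k with
  | zero =>
    intro s acc
    have h1 : PySem.Int.floordiv s 1 = s := by
      rw [PySem.Int.floordiv_eq_ediv_of_pos (by norm_num)]; simp
    have h2 : PySem.Int.mod s 1 = 0 := by
      rw [PySem.Int.mod_eq_emod_of_pos (by norm_num)]; simp
    simp only [Nat.cast_zero, zero_add, h1, h2, runA, pat]
    simp
  | succ k ih =>
    intro s acc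
    push_cast
    set n : Int := (k:Int) + 2 with hn
    rw [show (k:Int) + 1 + 1 = n from by omega]
    have hnpos : (0:Int) < n := by omega
    set q := PySem.Int.floordiv s n with hq
    set r := PySem.Int.mod s n with hr
    have hsum : q * n + r = s := PySem.Int.floordiv_mul_add_mod s n
    have hr0 : 0 ≤ r := PySem.Int.mod_nonneg s hnpos
    have hrlt : r < n := PySem.Int.mod_lt s hnpos
    have hstep : runA (k+1+1) s n acc = runA (k+1) (s - q) ((k:Int)+1) (acc ++ [q]) := by
      simp only [runA]
      rw [show n - 1 = (k:Int) + 1 from by omega]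
    rw [hstep, ih (s - q) (acc ++ [q])]
    conv_rhs => rw [show (k+1+1 : Nat) = (k+1)+1 from rfl, pat_cons]
    rw [List.append_assoc, List.singleton_append]
    congr 1
    have hhead : q + (if n - r ≤ 0 then 1 else 0) = q := by rw [if_neg (by omega)]; ring
    have hmul : q * n = q * ((k:Int)+1) + q := by ring
    by_cases hcase : r < (k:Int) + 1
    · have hq2 : PySem.Int.floordiv (s - q) ((k:Int)+1) = q := by
        rw [(PySem.Int.floordiv_eq_iff_of_pos (by omega)).2]
        constructor <;> nlinarith
      have hr2 : PySem.Int.mod (s - q) ((k:Int)+1) = r := by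
        have h := PySem.Int.floordiv_mul_add_mod (s - q) ((k:Int)+1)
        rw [hq2] at h; linarith
      rw [hq2, hr2, hhead]
      congr 1
      apply pat_congr
      intro j _
      rw [show n - r - 1 = (k:Int) + 1 - r from by omega]
    · have hreq : r = (k:Int) + 1 := by omega
      have hq2 : PySem.Int.floordiv (s - q) ((k:Int)+1) = q + 1 := by
        rw [(PySem.Int.floordiv_eq_iff_of_pos (by omega)).2]
        constructor <;> nlinarith
      have hr2 : PySem.Int.mod (s - q) ((k:Int)+1) = 0 := by
        have h := PySem.Int.floordiv_mul_add_mod (s - q) ((k:Int)+1)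
        rw [hq2] at h; linarith
      rw [hq2, hr2, hhead]
      congr 1
      apply pat_congr
      intro j hj
      have hjb : (j:Int) < (k:Int) + 1 := by exact_mod_cast hj
      rw [if_neg (by omega), if_pos (by omega)]
      ring

-- ===== VERDICT (by name: the statement is the Claim_ definition above) =====
theorem calc_group_sizes_spec : Claim_equal_calc_group_sizes := by
  unfold Claim_equal_calc_group_sizes Spec_calc_group_sizes
  intro s n _
  unfold calc_group_sizes calc_group_sizes_alt
  by_cases hn : n ≤ 0
  · simp [PySem.List.pyRange_one_eq_nil (by omega : n ≤ 0), hn]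
  · rw [if_neg hn]
    simp only [foldl_eq_runA]
    obtain ⟨k, hk⟩ : ∃ k : Nat, n = (k:Int) + 1 := ⟨(n - 1).toNat, by omega⟩
    subst hk
    have hlen : (PySem.List.pyRange 0 ((k:Int)+1) 1).length = k + 1 := by
      rw [PySem.List.length_pyRange_one]; omega
    rw [hlen, runA_closed k s [], List.nil_append,
      PySem.List.pyRange_one 0 ((k:Int)+1), List.map_map]
    rw [show (((k:Int)+1) - 0).toNat = k + 1 from by omega]
    unfold pat
    apply List.map_congr_left
    intro j _
    simp
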